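-- pv_equiv track=rewrite | github.com/kkarakas-lxera/lxera-vision-platform | openai_course_generator/_archive/old_generators/personalized_course_structure.py | _assess_technical_readiness
-- ===== SOURCE A (Python) =====
-- from typing import Dict, Any, List, Tuple
--
-- def _assess_technical_readiness(tool_proficiency: Dict[str, Any]) -> str:
--     """Assess technical readiness level."""
--
--     if not tool_proficiency:
--         return "basic"
--
--     proficiency_levels = [tools.get("proficiency", "basic") for tools in tool_proficiency.values()]
--
--     if "advanced" in proficiency_levels:
--         return "advanced"
--     elif "intermediate" in proficiency_levels:
--         return "intermediate"
--     else:
--         return "basic"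
-- ===== SOURCE B (Python) =====
-- def _assess_technical_readiness(tool_proficiency):
--     """Assess technical readiness level (single-pass max-over-ranks)."""
--     RANK = {"advanced": 2, "intermediate": 1}
--     best = 0
--     for tools in tool_proficiency.values():
--         best = max(best, RANK.get(tools.get("proficiency", "basic"), 0))
--     if best == 2:
--         return "advanced"
--     elif best == 1:
--         return "intermediate"
--     else:
--         return "basic"
-- ===== Notes on version B (the rewrite author's own statement) =====
-- stated objective: alternative
-- what changed: Replaces building the list of proficiency levels and two membership scans with a single pass that keeps the maximum rank seen (advanced=2, intermediate=1, other=0) and decodes it at the end.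
import Mathlib
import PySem

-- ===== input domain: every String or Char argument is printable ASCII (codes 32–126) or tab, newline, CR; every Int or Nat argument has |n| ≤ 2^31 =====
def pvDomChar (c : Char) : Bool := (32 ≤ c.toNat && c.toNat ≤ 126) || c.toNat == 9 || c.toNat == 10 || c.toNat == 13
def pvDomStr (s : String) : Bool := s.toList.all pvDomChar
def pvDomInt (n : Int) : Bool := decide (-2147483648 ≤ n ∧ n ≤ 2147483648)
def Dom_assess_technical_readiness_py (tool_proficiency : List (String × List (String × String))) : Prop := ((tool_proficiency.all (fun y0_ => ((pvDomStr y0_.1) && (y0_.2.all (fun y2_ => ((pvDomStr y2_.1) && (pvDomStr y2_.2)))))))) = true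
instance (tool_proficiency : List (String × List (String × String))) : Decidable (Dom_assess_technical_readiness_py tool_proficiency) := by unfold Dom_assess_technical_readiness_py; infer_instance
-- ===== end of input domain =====

-- B replaces the level-list build plus two membership scans with a single max-over-ranks pass (alternative decomposition, same cost).

-- ===== PORT A =====
def assess_technical_readiness_py (tool_proficiency : List (String × List (String × String))) : String :=
  if tool_proficiency = [] then "basic"
  else
    let proficiency_levels :=
      (PySem.Dict.ofList tool_proficiency).values.map
        (fun tools => (PySem.Dict.ofList tools).getD "proficiency" "basic")
    if proficiency_levels.contains "advanced" then "advanced"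
    else if proficiency_levels.contains "intermediate" then "intermediate"
    else "basic"

-- ===== PORT B =====
-- RANK.get(level, 0) with RANK = {"advanced": 2, "intermediate": 1}
def pvRank (s : String) : Int :=
  (PySem.Dict.ofList [("advanced", (2 : Int)), ("intermediate", 1)]).getD s 0

def assess_technical_readiness_py_alt (tool_proficiency : List (String × List (String × String))) : String :=
  let best :=
    (PySem.Dict.ofList tool_proficiency).values.foldl
      (fun acc tools => max acc (pvRank ((PySem.Dict.ofList tools).getD "proficiency" "basic"))) 0
  if best = 2 then "advanced"
  else if best = 1 then "intermediate"
  else "basic"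

-- ===== PRECONDITION & SPEC =====
def Spec_assess_technical_readiness_py (tool_proficiency : List (String × List (String × String))) (out : String) : Prop := out = assess_technical_readiness_py_alt tool_proficiency
instance (tool_proficiency : List (String × List (String × String))) (out : String) : Decidable (Spec_assess_technical_readiness_py tool_proficiency out) := by unfold Spec_assess_technical_readiness_py; infer_instance

-- ===== CLAIM (what is proved, stated in full; the proofs are below) =====
def Claim_equal_assess_technical_readiness_py : Prop := ∀ (tool_proficiency : List (String × List (String × String))), Dom_assess_technical_readiness_py tool_proficiency → Spec_assess_technical_readiness_py tool_proficiency (assess_technical_readiness_py tool_proficiency)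

-- ===== LEMMAS AND PROOFS =====

theorem pvRank_eq (s : String) :
    pvRank s = if s = "advanced" then 2 else if s = "intermediate" then 1 else 0 := by
  rcases eq_or_ne s "advanced" with h1 | h1
  · subst h1; decide
  · rcases eq_or_ne s "intermediate" with h2 | h2
    · subst h2; decide
    · simp only [h1, h2, if_false]
      unfold pvRank
      simp [PySem.Dict.ofList, PySem.Dict.update, PySem.Dict.getD_insert,
        PySem.Dict.getD_empty, h1, h2]
theorem fold_max_shift (ls : List String) (a : Int) (ha : 0 ≤ a) :
    ls.foldl (fun acc s => max acc (pvRank s)) a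
      = max a (ls.foldl (fun acc s => max acc (pvRank s)) 0) := by
  induction ls generalizing a with
  | nil => simp; omega
  | cons x xs ih =>
    simp only [List.foldl_cons]
    rw [ih (max a (pvRank x)) (le_trans ha (le_max_left _ _)),
        ih (max 0 (pvRank x)) (le_max_left _ _)]
    omega
theorem fold_max_char (ls : List String) :
    ls.foldl (fun acc s => max acc (pvRank s)) 0
      = if ls.contains "advanced" then 2
        else if ls.contains "intermediate" then 1 else 0 := by
  induction ls with
  | nil => simp
  | cons x xs ih =>
    simp only [List.foldl_cons]
    rw [fold_max_shift xs (max 0 (pvRank x)) (le_max_left _ _), ih, pvRank_eq]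
    rcases eq_or_ne x "advanced" with h1 | h1
    · subst h1; simp; split_ifs <;> try omega
    · rcases eq_or_ne x "intermediate" with h2 | h2
      · subst h2; simp [h1]; split_ifs <;> try omega
      · simp [h1, h2, Ne.symm h1, Ne.symm h2]; split_ifs <;> omega

-- ===== VERDICT (by name: the statement is the Claim_ definition above) =====
theorem assess_technical_readiness_py_spec : Claim_equal_assess_technical_readiness_py := by
  intro tp _
  unfold Spec_assess_technical_readiness_py
  by_cases h0 : tp = []
  · subst h0; decide
  · simp only [assess_technical_readiness_py, assess_technical_readiness_py_alt, h0, if_false]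
    rw [← List.foldl_map
          (f := fun tools => (PySem.Dict.ofList tools).getD "proficiency" "basic")
          (g := fun (acc : Int) s => max acc (pvRank s)),
        fold_max_char]
    split_ifs <;> simp_all
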